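-- pv_equiv track=rewrite | github.com/ryaneunderwood/Pokemon-Sunday-Dev | migrate_moves_pbs.py | convert_flags
-- ===== SOURCE A (Python) =====
-- FLAG_MAP = {
--     'a': 'Contact',
--     'b': 'CanProtect',
--     'd': 'Dance',
--     'e': 'CanMirrorMove',
--     'g': 'Bomb',
--     'h': 'HighCriticalHitRate',
--     'i': 'Biting',
--     'j': 'Punching',
--     'k': 'Sound',
--     'l': 'Powder',
--     'm': 'Pulse',
--     'n': 'Bomb',   # same as 'g' in v21.1
--     'o': 'Slicing',
-- }
--
-- def convert_flags(flag_str):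
--     seen = set()
--     result = []
--     for ch in flag_str.strip():
--         f = FLAG_MAP.get(ch)
--         if f and f not in seen:
--             seen.add(f)
--             result.append(f)
--     return result
-- ===== SOURCE B (Python) =====
-- FLAG_MAP = {
--     'a': 'Contact',
--     'b': 'CanProtect',
--     'd': 'Dance',
--     'e': 'CanMirrorMove',
--     'g': 'Bomb',
--     'h': 'HighCriticalHitRate',
--     'i': 'Biting',
--     'j': 'Punching',
--     'k': 'Sound',
--     'l': 'Powder',
--     'm': 'Pulse',
--     'n': 'Bomb',   # same as 'g' in v21.1
--     'o': 'Slicing',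
-- }
--
-- def convert_flags(flag_str):
--     # Build the result back-to-front: walk the stripped string from the END,
--     # prepend each mapped name and drop its later duplicates from the partial
--     # result.  First-occurrence order falls out without any 'seen' set.
--     out = []
--     for ch in reversed(flag_str.strip()):
--         name = FLAG_MAP.get(ch)
--         if name is not None:
--             out = [name] + [n for n in out if n != name]
--     return out
-- ===== Notes on version B (the rewrite author's own statement) =====
-- stated objective: alternative
-- what changed: Builds the result back-to-front: iterates over the reversed stripped string and, for each mapped character, prepends its name while removing the name's later duplicates from the partial result, so first-occurrence order emerges with no seen-set and no forward guarded accumulation.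
import Mathlib
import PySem

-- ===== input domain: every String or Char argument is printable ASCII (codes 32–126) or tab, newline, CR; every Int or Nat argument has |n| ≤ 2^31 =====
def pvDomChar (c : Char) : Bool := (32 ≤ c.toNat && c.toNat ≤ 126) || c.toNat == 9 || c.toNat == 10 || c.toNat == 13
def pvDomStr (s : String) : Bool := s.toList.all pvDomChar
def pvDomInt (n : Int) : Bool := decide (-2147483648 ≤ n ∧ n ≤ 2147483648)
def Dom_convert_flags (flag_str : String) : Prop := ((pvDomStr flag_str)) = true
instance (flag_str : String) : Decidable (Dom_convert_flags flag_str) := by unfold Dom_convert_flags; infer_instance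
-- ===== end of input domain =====

-- B builds the result back-to-front: it walks the reversed stripped string, prepending
-- each mapped name and dropping its later duplicates, instead of A's forward pass with
-- a seen-set (objective: alternative decomposition, same result).

-- ===== PORT A =====
def FLAG_MAP : PySem.Dict Char String := PySem.Dict.mk  -- dict literal (distinct keys)
  [('a', "Contact"), ('b', "CanProtect"), ('d', "Dance"), ('e', "CanMirrorMove"),
   ('g', "Bomb"), ('h', "HighCriticalHitRate"), ('i', "Biting"), ('j', "Punching"),
   ('k', "Sound"), ('l', "Powder"), ('m', "Pulse"), ('n', "Bomb"), ('o', "Slicing")]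

def convert_flags (flag_str : String) : List String :=
  -- seen = set(); result = []; for ch in flag_str.strip(): f = FLAG_MAP.get(ch);
  -- if f and f not in seen: seen.add(f); result.append(f)
  ((PySem.Str.strip flag_str).toList.foldl
    (fun (st : PySem.Set String × List String) ch =>
      match PySem.Dict.get? FLAG_MAP ch with
      | none => st            -- f is None: `if f` is false
      | some f =>
        if f != "" && !(PySem.Set.contains st.1 f) then
          (PySem.Set.add st.1 f, st.2 ++ [f])
        else st)
    (PySem.Set.empty, [])).2

-- ===== PORT B =====
def convert_flags_alt (flag_str : String) : List String :=
  -- out = []; for ch in reversed(flag_str.strip()):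
  --   name = FLAG_MAP.get(ch);  if name is not None: out = [name] + [n for n in out if n != name]
  (PySem.Str.strip flag_str).toList.reverse.foldl
    (fun (out : List String) ch =>
      match PySem.Dict.get? FLAG_MAP ch with
      | none => out
      | some name => name :: out.filter (fun n => n != name))
    []

-- ===== PRECONDITION & SPEC =====
def Spec_convert_flags (flag_str : String) (out : List String) : Prop := out = convert_flags_alt flag_str
instance (flag_str : String) (out : List String) : Decidable (Spec_convert_flags flag_str out) := by unfold Spec_convert_flags; infer_instance

-- ===== CLAIM =====
def Claim_equal_convert_flags : Prop := ∀ (flag_str : String), Dom_convert_flags flag_str → Spec_convert_flags flag_str (convert_flags flag_str)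

-- ===== LEMMAS AND PROOFS =====

-- keep-first dedup, defined by structural recursion (the shape B's backward pass produces)
def kf : List String → List String
  | [] => []
  | x :: t => x :: (kf t).filter (fun n => n != x)

-- kf commutes with filter
lemma kf_filter (p : String → Bool) (l : List String) : kf (l.filter p) = (kf l).filter p := by
  induction l with
  | nil => rfl
  | cons x t ih =>
    cases hp : p x with
    | true =>
      simp only [List.filter_cons_of_pos hp, kf, ih, List.filter_filter]
      refine congrArg (x :: ·) (List.filter_congr fun a _ => Bool.and_comm _ _)
    | false =>
      have hpx : ¬ p x = true := by simp [hp]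
      simp only [List.filter_cons_of_neg hpx, kf, ih, List.filter_filter]
      refine List.filter_congr fun a _ => ?_
      cases hpa : p a with
      | false => simp
      | true =>
        have hax : (a != x) = true := by
          refine bne_iff_ne.mpr fun h => ?_
          rw [h, hp] at hpa; exact Bool.false_ne_true hpa
        simp [hax]

-- A lookup in an association-list dict whose stored values are all non-empty yields a non-empty value.
lemma get?_vals_ne_empty (l : List (Char × String)) (hv : ∀ p ∈ l, p.2 ≠ "") (ch : Char)
    (f : String) (h : PySem.Dict.get? (PySem.Dict.mk l) ch = some f) : f ≠ "" := by
  induction l with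
  | nil => simp [PySem.Dict.get?] at h
  | cons p t ih =>
    rw [show PySem.Dict.mk (p :: t) = PySem.Dict.mk ((p.1, p.2) :: t) from rfl,
      PySem.Dict.get?_mk_cons] at h
    by_cases he : p.1 == ch
    · rw [if_pos he, Option.some.injEq] at h
      exact h ▸ hv p (List.mem_cons_self)
    · rw [if_neg he] at h
      exact ih (fun q hq => hv q (List.mem_cons_of_mem _ hq)) h

-- Every value stored in FLAG_MAP is a non-empty string, so Python's truthiness test `if f` passes.
lemma flag_map_get?_ne_empty (ch : Char) (f : String)
    (h : PySem.Dict.get? FLAG_MAP ch = some f) : f ≠ "" :=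
  get?_vals_ne_empty _ (by decide) ch f h

-- A's loop keeps `seen` and `result` equal (both collect first occurrences in order),
-- and equals the Set.ofList fold over the filterMapped characters.
lemma loop_pair (l : List Char) :
    ∀ (s : PySem.Set String),
      l.foldl
        (fun (st : PySem.Set String × List String) ch =>
          match PySem.Dict.get? FLAG_MAP ch with
          | none => st
          | some f =>
            if f != "" && !(PySem.Set.contains st.1 f) then
              (PySem.Set.add st.1 f, st.2 ++ [f])
            else st)
        (s, s)
      = ((l.filterMap (fun ch => PySem.Dict.get? FLAG_MAP ch)).foldl PySem.Set.add s,
         (l.filterMap (fun ch => PySem.Dict.get? FLAG_MAP ch)).foldl PySem.Set.add s) := by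
  induction l with
  | nil => intro s; rfl
  | cons ch t ih =>
    intro s
    simp only [List.foldl_cons, List.filterMap_cons]
    cases h : PySem.Dict.get? FLAG_MAP ch with
    | none => simpa using ih s
    | some f =>
      have hf : f ≠ "" := flag_map_get?_ne_empty ch f h
      by_cases hc : f ∈ s
      · have hct : PySem.Set.contains s f = true := (PySem.Set.contains_iff s f).mpr hc
        simp only [hct, Bool.not_true, Bool.and_false, Bool.false_eq_true,
          not_false_eq_true, if_neg]
        rw [ih, List.foldl_cons, PySem.Set.add_of_mem hc]
      · have hct : PySem.Set.contains s f = false := by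
          cases hcf : PySem.Set.contains s f
          · rfl
          · exact absurd ((PySem.Set.contains_iff s f).mp hcf) hc
        have hfb : (f != "") = true := by simpa using hf
        simp only [hct, hfb, Bool.not_false, Bool.and_true, if_pos]
        rw [PySem.Set.add_of_not_mem hc, ih, List.foldl_cons, PySem.Set.add_of_not_mem hc]

-- the Set.add fold (= ordered dedup) is kf, generalized over the accumulator
lemma foldl_add_eq_kf (l : List String) :
    ∀ (acc : PySem.Set String),
      l.foldl PySem.Set.add acc = acc ++ kf (l.filter (fun y => !PySem.Set.contains acc y)) := by
  induction l with
  | nil => intro acc; simp [kf]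
  | cons x t ih =>
    intro acc
    by_cases hc : x ∈ acc
    · rw [List.foldl_cons, PySem.Set.add_of_mem hc, ih,
        List.filter_cons_of_neg (by simpa using hc)]
    · have hpred : ∀ y, (!PySem.Set.contains (acc ++ [x]) y)
          = ((y != x) && (!PySem.Set.contains acc y)) := by
        intro y
        by_cases hyx : y = x <;> by_cases hy : y ∈ acc <;> simp [hyx, hy]
      have hfilt : t.filter (fun y => !PySem.Set.contains (acc ++ [x]) y)
          = (t.filter (fun y => !PySem.Set.contains acc y)).filter (fun n => n != x) := by
        rw [List.filter_filter]
        exact List.filter_congr fun a _ => hpred a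
      calc (x :: t).foldl PySem.Set.add acc
          = t.foldl PySem.Set.add (acc ++ [x]) := by
            rw [List.foldl_cons, PySem.Set.add_of_not_mem hc]
        _ = (acc ++ [x]) ++ kf (t.filter (fun y => !PySem.Set.contains (acc ++ [x]) y)) := ih _
        _ = acc ++ (x :: kf ((t.filter (fun y => !PySem.Set.contains acc y)).filter (fun n => n != x))) := by
            rw [hfilt, List.append_assoc]; rfl
        _ = acc ++ (x :: (kf (t.filter (fun y => !PySem.Set.contains acc y))).filter (fun n => n != x)) := by
            rw [kf_filter]
        _ = acc ++ kf ((x :: t).filter (fun y => !PySem.Set.contains acc y)) := by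
            rw [List.filter_cons_of_pos (by simpa using hc)]
            simp only [kf]

-- B's backward fold computes kf of the filterMapped characters
lemma foldr_eq_kf (l : List Char) :
    l.foldr
      (fun ch (out : List String) =>
        match PySem.Dict.get? FLAG_MAP ch with
        | none => out
        | some name => name :: out.filter (fun n => n != name))
      []
    = kf (l.filterMap (fun ch => PySem.Dict.get? FLAG_MAP ch)) := by
  induction l with
  | nil => rfl
  | cons ch t ih =>
    simp only [List.foldr_cons, List.filterMap_cons]
    cases h : PySem.Dict.get? FLAG_MAP ch with
    | none => exact ih
    | some name => simp [kf, ih]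

-- ===== VERDICT (by name: the statement is the Claim_ definition above) =====
theorem convert_flags_spec : Claim_equal_convert_flags := by
  intro flag_str _
  unfold Spec_convert_flags convert_flags convert_flags_alt
  rw [show ((PySem.Set.empty : PySem.Set String), ([] : List String))
        = ((PySem.Set.empty : PySem.Set String), (PySem.Set.empty : PySem.Set String)) from rfl,
      loop_pair, List.foldl_reverse]
  simp only []
  rw [foldr_eq_kf, foldl_add_eq_kf]
  simp [PySem.Set.empty, PySem.Set.contains]
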